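-- pv_equiv track=rewrite | github.com/nathankkh/leetcode | src/2503_Maximum Number of Points From Grid Queries.py | helper
-- ===== SOURCE A (Python) =====
-- from collections import deque
--
-- def helper(grid, val):
--     if grid[0][0] > val:
--         return 0
--     visited = [[False for _ in grid[0]] for _ in grid]
--     max_r = len(grid) - 1
--     max_c = len(grid[0]) - 1
--
--     queue = deque()
--     score = 0
--     directions = [(0, 1), (1, 0), (0, -1), (-1, 0)]
--     queue.append((0, 0))
--     visited[0][0] = True
--     while queue:
--         curr_r, curr_c = queue.popleft()
--
--         if grid[curr_r][curr_c] >= val :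
--             continue
--         else:
--             score += 1
--
--             for dir in directions:
--                 new_r = curr_r + dir[0]
--                 new_c = curr_c + dir[1]
--
--                 if new_r >= 0 and new_r <= max_r and new_c >= 0 and new_c <= max_c:
--                     if not visited[new_r][new_c]:
--                         visited[new_r][new_c] = True
--                         queue.append((new_r, new_c))
--     return score
-- ===== SOURCE B (Python) =====
-- def helper(grid, val):
--     if grid[0][0] >= val:
--         return 0
--     m, n = len(grid), len(grid[0])
--     marked = {(0, 0)}
--     for _ in range(m * n):
--         changed = False
--         for r in range(m):
--             for c in range(n):
--                 if (r, c) not in marked and grid[r][c] < val: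
--                     if (r - 1, c) in marked or (r + 1, c) in marked \
--                             or (r, c - 1) in marked or (r, c + 1) in marked:
--                         marked.add((r, c))
--                         changed = True
--         if not changed:
--             break
--     return len(marked)
-- ===== Notes on version B (the rewrite author's own statement) =====
-- stated objective: alternative
-- what changed: A's deque-driven BFS flood fill (pop a cell, count it if below val, push unvisited 4-neighbours) is replaced by a fixed-point relaxation: a marked set seeded with (0,0) grows by repeated in-place row-major sweeps that mark every unmarked below-val cell with a marked neighbour, stopping when a sweep changes nothing, then its size is returned.
-- outside the precondition, e.g. on helper([[0, 5], [9]], 1): A returns 1, B raises IndexError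
import Mathlib
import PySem

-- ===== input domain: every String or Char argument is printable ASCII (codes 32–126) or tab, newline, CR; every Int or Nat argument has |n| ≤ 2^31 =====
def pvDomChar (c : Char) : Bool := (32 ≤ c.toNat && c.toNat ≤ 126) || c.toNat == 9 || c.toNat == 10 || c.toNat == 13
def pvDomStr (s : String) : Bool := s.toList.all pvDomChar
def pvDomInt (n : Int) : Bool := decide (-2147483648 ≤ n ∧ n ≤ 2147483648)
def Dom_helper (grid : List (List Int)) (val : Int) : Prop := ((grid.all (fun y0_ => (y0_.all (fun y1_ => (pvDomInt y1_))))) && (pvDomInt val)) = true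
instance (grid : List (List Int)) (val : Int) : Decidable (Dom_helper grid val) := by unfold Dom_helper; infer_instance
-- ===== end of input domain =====

-- B replaces A's deque-driven BFS flood fill by a fixed-point relaxation: repeated in-place
-- whole-grid sweeps mark every unmarked below-threshold cell adjacent to a marked one until a
-- sweep changes nothing; objective: alternative (different algorithm, no speed claim).

-- ===== PORT A =====
-- shared 2D read grid[r][c]; the `0 ≤ r ∧ 0 ≤ c` guard is exact here because both Pythons only
-- index the grid with indices already checked (or proven) non-negative, so no wraparound occurs.
def gval (grid : List (List Int)) (r c : Int) : Int :=
  if 0 ≤ r ∧ 0 ≤ c then (grid.getD r.toNat []).getD c.toNat 0 else 0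

-- visited[r][c] read/write on the boolean matrix (same guard justification as gval)
def mget (vis : List (List Bool)) (r c : Int) : Bool :=
  if 0 ≤ r ∧ 0 ≤ c then (vis.getD r.toNat []).getD c.toNat false else false

def mset (vis : List (List Bool)) (r c : Int) : List (List Bool) :=
  if 0 ≤ r ∧ 0 ≤ c then vis.set r.toNat ((vis.getD r.toNat []).set c.toNat true) else vis

def pvDirections : List (Int × Int) := [(0, 1), (1, 0), (0, -1), (-1, 0)]

-- body of A's `for dir in directions:` loop, acting on the (queue, visited) state
def tryPush (maxR maxC r c : Int) (s : List (Int × Int) × List (List Bool)) (d : Int × Int) :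
    List (Int × Int) × List (List Bool) :=
  let nr := r + d.1
  let nc := c + d.2
  if 0 ≤ nr ∧ nr ≤ maxR ∧ 0 ≤ nc ∧ nc ≤ maxC then
    if mget s.2 nr nc = false then (s.1 ++ [(nr, nc)], mset s.2 nr nc) else s
  else s

-- A's `while queue:` loop; the fuel argument only makes the recursion structural — it is proven
-- never to run out on the admitted inputs (each iteration pops one cell or marks a fresh cell)
def bfsA (grid : List (List Int)) (val maxR maxC : Int) :
    Nat → List (Int × Int) → List (List Bool) → Int → Int
  | _, [], _, score => score
  | 0, _ :: _, _, score => score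
  | fuel + 1, (r, c) :: queue, vis, score =>
    if val ≤ gval grid r c then bfsA grid val maxR maxC fuel queue vis score
    else
      let s := pvDirections.foldl (tryPush maxR maxC r c) (queue, vis)
      bfsA grid val maxR maxC fuel s.1 s.2 (score + 1)

def helper (grid : List (List Int)) (val : Int) : Int :=
  if val < gval grid 0 0 then 0
  else
    let vis0 := grid.map (fun _ => (grid.headD []).map (fun _ => false))
    let maxR := (grid.length : Int) - 1
    let maxC := ((grid.headD []).length : Int) - 1
    let vis1 := mset vis0 0 0
    bfsA grid val maxR maxC (grid.length * (grid.headD []).length + 1) [(0, 0)] vis1 0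

-- ===== PORT B =====
-- one in-place sweep over all cells (row-major): marks every unmarked below-threshold cell that
-- has a marked 4-neighbour at the moment it is visited; the flag records whether anything changed
def passB (grid : List (List Int)) (val m n : Int) (s0 : List (Int × Int) × Bool) :
    List (Int × Int) × Bool :=
  (PySem.List.pyRange 0 m 1).foldl (fun s r =>
    (PySem.List.pyRange 0 n 1).foldl (fun s c =>
      if (r, c) ∉ s.1 ∧ gval grid r c < val then
        if (r - 1, c) ∈ s.1 ∨ (r + 1, c) ∈ s.1 ∨ (r, c - 1) ∈ s.1 ∨ (r, c + 1) ∈ s.1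
        then (PySem.Set.add s.1 (r, c), true)
        else s
      else s) s) s0

-- B's `for _ in range(m * n):` loop: sweep, stop as soon as a sweep changes nothing
def loopB (grid : List (List Int)) (val m n : Int) : Nat → List (Int × Int) → Int
  | 0, marked => (marked.length : Int)
  | k + 1, marked =>
    let s := passB grid val m n (marked, false)
    if s.2 = true then loopB grid val m n k s.1 else (s.1.length : Int)

def helper_alt (grid : List (List Int)) (val : Int) : Int :=
  if val ≤ gval grid 0 0 then 0
  else
    loopB grid val (grid.length : Int) ((grid.headD []).length : Int)
      (grid.length * (grid.headD []).length) [(0, 0)]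

-- ===== PRECONDITION & SPEC =====
-- Pre_ excludes empty grids / empty first rows (A raises IndexError on grid[0][0]) and grids with
-- a row shorter than the first row whose walk actually starts (grid[0][0] < val): there A raises
-- IndexError when BFS reaches a missing cell and otherwise returns a value depending on which cells
-- BFS happens to reach, while B, which sweeps all m×n positions, raises IndexError; when
-- grid[0][0] >= val both return 0 without touching other cells, so ragged grids are admitted then.
def Pre_helper (grid : List (List Int)) (val : Int) : Prop :=
  grid ≠ [] ∧ grid.headD [] ≠ [] ∧
    ((∀ row ∈ grid, (grid.headD []).length ≤ row.length) ∨
      val ≤ (grid.headD []).headD 0)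
instance (grid : List (List Int)) (val : Int) : Decidable (Pre_helper grid val) := by
  unfold Pre_helper; infer_instance

def pvWitness_helper : List (List Int) × Int := ([[1, 2, 3], [3, 1, 9], [0, 0, 5]], 3)

def Spec_helper (grid : List (List Int)) (val : Int) (out : Int) : Prop := out = helper_alt grid val
instance (grid : List (List Int)) (val : Int) (out : Int) : Decidable (Spec_helper grid val out) := by unfold Spec_helper; infer_instance

-- ===== CLAIM (what is proved, stated in full; the proofs are below) =====
def Claim_equal_helper : Prop := ∀ (grid : List (List Int)) (val : Int), Dom_helper grid val → Pre_helper grid val → Spec_helper grid val (helper grid val)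

-- ===== LEMMAS AND PROOFS =====

-- the cell (0,0)
def origin : Int × Int := (0, 0)

-- in-bounds cells of the m×n board
def inB (m n : Int) (p : Int × Int) : Prop := 0 ≤ p.1 ∧ p.1 < m ∧ 0 ≤ p.2 ∧ p.2 < n

-- a cell the BFS may expand through: in bounds and strictly below the threshold
def okc (grid : List (List Int)) (val m n : Int) (p : Int × Int) : Prop :=
  inB m n p ∧ gval grid p.1 p.2 < val

-- 4-adjacency
def adjc (p q : Int × Int) : Prop :=
  (q.1 = p.1 ∧ q.2 = p.2 + 1) ∨ (q.1 = p.1 + 1 ∧ q.2 = p.2) ∨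
  (q.1 = p.1 ∧ q.2 = p.2 - 1) ∨ (q.1 = p.1 - 1 ∧ q.2 = p.2)

-- one step of the below-threshold walk
def stepR (grid : List (List Int)) (val m n : Int) (p q : Int × Int) : Prop :=
  okc grid val m n p ∧ okc grid val m n q ∧ adjc p q

-- the set both programs count: cells reachable from (0,0) through below-threshold cells
def ReachP (grid : List (List Int)) (val m n : Int) (p : Int × Int) : Prop :=
  Relation.ReflTransGen (stepR grid val m n) origin p ∧ okc grid val m n p


-- ---------- matrix infrastructure ----------

-- visited has grid.length rows of (grid.headD []).length booleans each
def dimsOk (grid : List (List Int)) (vis : List (List Bool)) : Prop :=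
  vis.length = grid.length ∧ ∀ row ∈ vis, row.length = (grid.headD []).length

-- number of still-false entries, the bfs termination measure component
def cntF (vis : List (List Bool)) : Nat := (vis.map (fun row => row.count false)).sum

lemma mget_eq (vis : List (List Bool)) (r c : Int) :
    mget vis r c =
      if 0 ≤ r ∧ 0 ≤ c then (((vis[r.toNat]?).getD []))[c.toNat]?.getD false else false := by
  unfold mget
  rw [List.getD_eq_getElem?_getD, List.getD_eq_getElem?_getD]

lemma mget_true_bounds (vis : List (List Bool)) (r c : Int) (h : mget vis r c = true) :
    0 ≤ r ∧ r.toNat < vis.length ∧ 0 ≤ c ∧ c.toNat < ((vis[r.toNat]?).getD []).length := by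
  rw [mget_eq] at h
  split_ifs at h with hg
  refine ⟨hg.1, ?_, hg.2, ?_⟩
  · by_contra hb
    have hn : vis[r.toNat]? = none := List.getElem?_eq_none (by omega)
    rw [hn] at h
    simp at h
  · by_contra hb
    have hn : ((vis[r.toNat]?).getD [])[c.toNat]? = none := List.getElem?_eq_none (by omega)
    rw [hn] at h
    simp at h

lemma mget_inB (grid : List (List Int)) (vis : List (List Bool)) (hd : dimsOk grid vis)
    (r c : Int) (h : mget vis r c = true) :
    inB (grid.length : Int) ((grid.headD []).length : Int) (r, c) := by
  obtain ⟨h0, h1, h2, h3⟩ := mget_true_bounds vis r c h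
  have hget : vis[r.toNat]?.getD [] = vis[r.toNat]'h1 := by
    rw [List.getElem?_eq_getElem h1]; rfl
  have hrow : (vis[r.toNat]?.getD []).length = (grid.headD []).length := by
    rw [hget]; exact hd.2 _ (List.getElem_mem h1)
  have hlen : vis.length = grid.length := hd.1
  exact ⟨h0, by omega, h2, by omega⟩

lemma mset_eq_set (vis : List (List Bool)) (r c : Int) (h0 : 0 ≤ r) (h2 : 0 ≤ c) :
    mset vis r c = vis.set r.toNat ((vis[r.toNat]?.getD []).set c.toNat true) := by
  unfold mset
  rw [if_pos ⟨h0, h2⟩, List.getD_eq_getElem?_getD]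

lemma mset_dims (grid : List (List Int)) (vis : List (List Bool)) (hd : dimsOk grid vis)
    (r c : Int) : dimsOk grid (mset vis r c) := by
  unfold mset
  split_ifs with hg
  · by_cases hlt : r.toNat < vis.length
    · refine ⟨by simp [hd.1], ?_⟩
      intro row hrow
      rcases List.mem_or_eq_of_mem_set hrow with h | h
      · exact hd.2 _ h
      · subst h
        rw [List.length_set, List.getD_eq_getElem _ _ hlt]
        exact hd.2 _ (List.getElem_mem hlt)
    · rw [List.set_eq_of_length_le (by omega)]
      exact hd
  · exact hd

lemma mget_mset (vis : List (List Bool)) (r c p q : Int) :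
    mget (mset vis r c) p q =
      if p = r ∧ q = c ∧ 0 ≤ r ∧ r.toNat < vis.length ∧ 0 ≤ c ∧
          c.toNat < ((vis[r.toNat]?).getD []).length then true
      else mget vis p q := by
  rcases Decidable.em (0 ≤ r ∧ 0 ≤ c) with hrc | hrc
  · rw [mset_eq_set vis r c hrc.1 hrc.2]
    rcases Decidable.em (0 ≤ p ∧ 0 ≤ q) with hpq | hpq
    · by_cases hr : p = r
      · subst hr
        by_cases hrl : p.toNat < vis.length
        · have houter : (vis.set p.toNat ((vis[p.toNat]?.getD []).set c.toNat true))[p.toNat]?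
              = some ((vis[p.toNat]?.getD []).set c.toNat true) := by
            rw [List.getElem?_set, if_pos rfl, if_pos hrl]
          rw [mget_eq, if_pos hpq, houter]
          simp only [Option.getD_some]
          by_cases hq : q = c
          · subst hq
            by_cases hcl : q.toNat < (vis[p.toNat]?.getD []).length
            · rw [List.getElem?_set, if_pos rfl, if_pos hcl]
              split_ifs with hfin
              · rfl
              · exact absurd (by and_intros <;> first | trivial | rfl | assumption | omega) hfin
            · rw [List.set_eq_of_length_le (by omega)]
              rw [if_neg (by intro hx; exact hcl hx.2.2.2.2.2)]
              rw [mget_eq, if_pos hpq]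
          · have hqc : c.toNat ≠ q.toNat := by omega
            rw [List.getElem?_set, if_neg hqc]
            rw [if_neg (by intro hx; exact hq hx.2.1)]
            rw [mget_eq, if_pos hpq]
        · rw [List.set_eq_of_length_le (by omega)]
          rw [if_neg (by intro hx; exact hrl hx.2.2.2.1)]
      · have hpr : r.toNat ≠ p.toNat := by omega
        rw [mget_eq, if_pos hpq, List.getElem?_set, if_neg hpr]
        rw [if_neg (by intro hx; exact hr hx.1)]
        rw [mget_eq, if_pos hpq]
    · rw [mget_eq, if_neg hpq]
      rw [if_neg (by intro hx; exact hpq ⟨hx.1 ▸ hrc.1, hx.2.1 ▸ hrc.2⟩)]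
      rw [mget_eq, if_neg hpq]
  · have hm : mset vis r c = vis := by unfold mset; rw [if_neg hrc]
    rw [hm]
    rw [if_neg (by intro hx; exact hrc ⟨hx.2.2.1, hx.2.2.2.2.1⟩)]

lemma mget_mset_mono (vis : List (List Bool)) (r c p q : Int)
    (h : mget vis p q = true) : mget (mset vis r c) p q = true := by
  rw [mget_mset]
  split_ifs with hx
  · rfl
  · exact h

lemma mget_mset_self (vis : List (List Bool)) (r c : Int) (h0 : 0 ≤ r) (h2 : 0 ≤ c)
    (h1 : r.toNat < vis.length) (h3 : c.toNat < ((vis[r.toNat]?).getD []).length) :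
    mget (mset vis r c) r c = true := by
  rw [mget_mset]
  rw [if_pos ⟨rfl, rfl, h0, h1, h2, h3⟩]

lemma mget_mset_cases (vis : List (List Bool)) (r c p q : Int)
    (h : mget (mset vis r c) p q = true) : (p = r ∧ q = c) ∨ mget vis p q = true := by
  rw [mget_mset] at h
  split_ifs at h with hx
  · exact Or.inl ⟨hx.1, hx.2.1⟩
  · exact Or.inr h

-- flipping one false entry to true decreases the false-count by exactly one
lemma count_false_set (row : List Bool) (i : Nat) (h1 : i < row.length)
    (h2 : row[i]?.getD false = false) :
    (row.set i true).count false + 1 = row.count false := by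
  induction row generalizing i with
  | nil => simp at h1
  | cons b t ih =>
    cases i with
    | zero =>
      simp only [List.getElem?_cons_zero, Option.getD_some] at h2
      subst h2
      simp [List.count_cons]
    | succ j =>
      simp only [List.getElem?_cons_succ] at h2
      simp only [List.length_cons] at h1
      have := ih j (by omega) h2
      simp only [List.set_cons_succ, List.count_cons]
      omega

lemma cntF_set (vis : List (List Bool)) (i : Nat) (R : List Bool) (hi : i < vis.length) :
    cntF (vis.set i R) + (vis[i]?.getD []).count false = cntF vis + R.count false := by
  induction vis generalizing i with
  | nil => simp at hi
  | cons row t ih =>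
    cases i with
    | zero =>
      simp only [List.set_cons_zero, List.getElem?_cons_zero, Option.getD_some]
      unfold cntF
      simp only [List.map_cons, List.sum_cons]
      omega
    | succ j =>
      simp only [List.set_cons_succ, List.getElem?_cons_succ]
      have := ih j (by simpa using (by simp at hi; omega))
      unfold cntF at *
      simp only [List.map_cons, List.sum_cons]
      omega

lemma cntF_mset (vis : List (List Bool)) (r c : Int) (h0 : 0 ≤ r) (h2 : 0 ≤ c)
    (h1 : r.toNat < vis.length) (h3 : c.toNat < ((vis[r.toNat]?).getD []).length)
    (hf : mget vis r c = false) :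
    cntF (mset vis r c) + 1 = cntF vis := by
  rw [mset_eq_set vis r c h0 h2]
  have hset := cntF_set vis r.toNat ((vis[r.toNat]?.getD []).set c.toNat true) h1
  have hfr : (vis[r.toNat]?.getD [])[c.toNat]?.getD false = false := by
    rw [mget_eq, if_pos ⟨h0, h2⟩] at hf
    exact hf
  have hcnt := count_false_set (vis[r.toNat]?.getD []) c.toNat h3 hfr
  omega

-- ---------- abbreviations at the concrete board size ----------

def inBg (grid : List (List Int)) (p : Int × Int) : Prop :=
  inB (grid.length : Int) ((grid.headD []).length : Int) p

def okg (grid : List (List Int)) (val : Int) (p : Int × Int) : Prop :=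
  okc grid val (grid.length : Int) ((grid.headD []).length : Int) p

def Rch (grid : List (List Int)) (val : Int) (p : Int × Int) : Prop :=
  ReachP grid val (grid.length : Int) ((grid.headD []).length : Int) p

lemma adjc_iff (p q : Int × Int) :
    adjc p q ↔ (q = (p.1, p.2 + 1) ∨ q = (p.1 + 1, p.2) ∨ q = (p.1, p.2 - 1) ∨ q = (p.1 - 1, p.2)) := by
  unfold adjc
  constructor
  · rintro (⟨h1, h2⟩ | ⟨h1, h2⟩ | ⟨h1, h2⟩ | ⟨h1, h2⟩)
    · exact Or.inl (Prod.ext h1 h2)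
    · exact Or.inr (Or.inl (Prod.ext h1 h2))
    · exact Or.inr (Or.inr (Or.inl (Prod.ext h1 h2)))
    · exact Or.inr (Or.inr (Or.inr (Prod.ext h1 h2)))
  · rintro (rfl | rfl | rfl | rfl)
    · exact Or.inl ⟨rfl, rfl⟩
    · exact Or.inr (Or.inl ⟨rfl, rfl⟩)
    · exact Or.inr (Or.inr (Or.inl ⟨rfl, rfl⟩))
    · exact Or.inr (Or.inr (Or.inr ⟨rfl, rfl⟩))

-- ---------- the BFS loop invariant ----------

structure InvA (grid : List (List Int)) (val : Int) (Q : List (Int × Int))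
    (vis : List (List Bool)) (C : List (Int × Int)) : Prop where
  dims : dimsOk grid vis
  qmem : ∀ x ∈ Q, mget vis x.1 x.2 = true
  qnd : Q.Nodup
  orig : mget vis 0 0 = true
  reach : ∀ p : Int × Int, mget vis p.1 p.2 = true →
      p = origin ∨ ∃ b, Rch grid val b ∧ adjc b p
  cnd : C.Nodup
  cmem : ∀ x ∈ C, mget vis x.1 x.2 = true ∧ x ∉ Q ∧ okg grid val x
  cfull : ∀ p : Int × Int, mget vis p.1 p.2 = true → p ∉ Q → okg grid val p → p ∈ C
  cclosed : ∀ x ∈ C, ∀ p : Int × Int, inBg grid p → adjc x p → mget vis p.1 p.2 = true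

lemma rch_of_mget_ok (grid : List (List Int)) (val : Int) (vis : List (List Bool))
    (hre : ∀ p : Int × Int, mget vis p.1 p.2 = true →
      p = origin ∨ ∃ b, Rch grid val b ∧ adjc b p)
    (q : Int × Int) (hq : mget vis q.1 q.2 = true) (hok : okg grid val q) :
    Rch grid val q := by
  rcases hre q hq with rfl | ⟨b, hb, hadj⟩
  · exact ⟨Relation.ReflTransGen.refl, hok⟩
  · exact ⟨hb.1.tail ⟨hb.2, hok, hadj⟩, hok⟩

-- when the queue is empty, the counted list is exactly the reachable set
lemma finalA (grid : List (List Int)) (val : Int) (vis : List (List Bool))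
    (C : List (Int × Int)) (inv : InvA grid val [] vis C) :
    ∀ p, p ∈ C ↔ Rch grid val p := by
  intro p
  constructor
  · intro hp
    obtain ⟨hm, _, hok⟩ := inv.cmem p hp
    exact rch_of_mget_ok grid val vis inv.reach p hm hok
  · rintro ⟨hrtg, hok⟩
    have key : ∀ x : Int × Int,
        Relation.ReflTransGen (stepR grid val (grid.length : Int) ((grid.headD []).length : Int)) origin x →
        okg grid val x → x ∈ C := by
      intro x hx
      induction hx with
      | refl => intro hok0; exact inv.cfull origin inv.orig (by simp) hok0
      | tail hab hbc ih =>
        intro hokc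
        obtain ⟨hokb, _, hadj⟩ := hbc
        have hbC := ih hokb
        have hmc := inv.cclosed _ hbC _ hokc.1 hadj
        exact inv.cfull _ hmc (by simp) hokc
    exact key p hrtg hok

lemma adjc_dir (q d : Int × Int) (hd : d ∈ pvDirections) : adjc q (q.1 + d.1, q.2 + d.2) := by
  unfold pvDirections at hd
  rw [adjc_iff]
  simp only [List.mem_cons, List.not_mem_nil, or_false] at hd
  rcases hd with rfl | rfl | rfl | rfl
  · left; simp
  · right; left; simp
  · right; right; left; simp; omega
  · right; right; right; simp; constructor <;> omega

-- ---------- the per-direction mid-iteration invariant ----------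

structure Mid (grid : List (List Int)) (val : Int) (q : Int × Int) (C : List (Int × Int))
    (K : Nat) (s : List (Int × Int) × List (List Bool)) : Prop where
  dims : dimsOk grid s.2
  qmem : ∀ x ∈ s.1, mget s.2 x.1 x.2 = true
  qnd : s.1.Nodup
  orig : mget s.2 0 0 = true
  reach : ∀ p : Int × Int, mget s.2 p.1 p.2 = true →
      p = origin ∨ ∃ b, Rch grid val b ∧ adjc b p
  cmem : ∀ x ∈ q :: C, mget s.2 x.1 x.2 = true ∧ x ∉ s.1 ∧ okg grid val x
  cfull : ∀ p : Int × Int, mget s.2 p.1 p.2 = true → p ∉ s.1 → okg grid val p → p ∈ q :: C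
  cclC : ∀ x ∈ C, ∀ p : Int × Int, inBg grid p → adjc x p → mget s.2 p.1 p.2 = true
  meas : s.1.length + cntF s.2 = K

-- one direction step preserves the mid-invariant, covers its own neighbour, and only grows visited
lemma tryPush_mid (grid : List (List Int)) (val : Int) (q : Int × Int) (C : List (Int × Int))
    (K : Nat) (d : Int × Int) (hd : d ∈ pvDirections) (hq : Rch grid val q)
    (s : List (Int × Int) × List (List Bool)) (h : Mid grid val q C K s) :
    Mid grid val q C K (tryPush ((grid.length : Int) - 1) (((grid.headD []).length : Int) - 1) q.1 q.2 s d) ∧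
    (inBg grid (q.1 + d.1, q.2 + d.2) →
      mget (tryPush ((grid.length : Int) - 1) (((grid.headD []).length : Int) - 1) q.1 q.2 s d).2 (q.1 + d.1) (q.2 + d.2) = true) ∧
    (∀ p : Int × Int, mget s.2 p.1 p.2 = true →
      mget (tryPush ((grid.length : Int) - 1) (((grid.headD []).length : Int) - 1) q.1 q.2 s d).2 p.1 p.2 = true) := by
  unfold tryPush
  simp only []
  split_ifs with hbnd hnew
  · -- a fresh in-bounds neighbour is marked and appended
    obtain ⟨hb1, hb2, hb3, hb4⟩ := hbnd
    have hrl : (q.1 + d.1).toNat < s.2.length := by rw [h.dims.1]; omega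
    have hrowmem : (s.2[(q.1 + d.1).toNat]?.getD []) ∈ s.2 := by
      rw [List.getElem?_eq_getElem hrl]
      exact List.getElem_mem hrl
    have hcl : (q.2 + d.2).toNat < ((s.2[(q.1 + d.1).toNat]?.getD [])).length := by
      rw [h.dims.2 _ hrowmem]; omega
    have hself : mget (mset s.2 (q.1 + d.1) (q.2 + d.2)) (q.1 + d.1) (q.2 + d.2) = true :=
      mget_mset_self _ _ _ (by omega) (by omega) hrl hcl
    have hmono : ∀ p : Int × Int, mget s.2 p.1 p.2 = true →
        mget (mset s.2 (q.1 + d.1) (q.2 + d.2)) p.1 p.2 = true :=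
      fun p hp => mget_mset_mono _ _ _ _ _ hp
    have hcases : ∀ p : Int × Int, mget (mset s.2 (q.1 + d.1) (q.2 + d.2)) p.1 p.2 = true →
        p = (q.1 + d.1, q.2 + d.2) ∨ mget s.2 p.1 p.2 = true := by
      intro p hp
      rcases mget_mset_cases _ _ _ _ _ hp with ⟨e1, e2⟩ | hold
      · exact Or.inl (Prod.ext e1 e2)
      · exact Or.inr hold
    refine ⟨?_, fun _ => hself, fun p hp => hmono p hp⟩
    constructor
    · exact mset_dims _ _ h.dims _ _
    · intro x hx
      rcases List.mem_append.mp hx with hold | hnew2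
      · exact hmono x (h.qmem x hold)
      · simp at hnew2
        subst hnew2
        exact hself
    · refine List.Nodup.append h.qnd (by simp) ?_
      intro a ha hb
      simp at hb
      subst hb
      have := h.qmem _ ha
      rw [this] at hnew
      simp at hnew
    · exact mget_mset_mono _ _ _ _ _ h.orig
    · intro p hp
      rcases hcases p hp with rfl | hold
      · exact Or.inr ⟨q, hq, adjc_dir q d hd⟩
      · exact h.reach p hold
    · intro x hx
      obtain ⟨hm, hq2, hok⟩ := h.cmem x hx
      refine ⟨hmono x hm, ?_, hok⟩
      intro hmem
      rcases List.mem_append.mp hmem with hold | hnew2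
      · exact hq2 hold
      · simp at hnew2
        subst hnew2
        rw [hm] at hnew
        simp at hnew
    · intro p hp hpq hok
      rcases hcases p hp with rfl | hold
      · exact absurd (List.mem_append.mpr (Or.inr (by simp))) hpq
      · exact h.cfull p hold (fun hc => hpq (List.mem_append.mpr (Or.inl hc))) hok
    · intro x hx p hin hadj
      exact hmono p (h.cclC x hx p hin hadj)
    · have hcnt := cntF_mset s.2 (q.1 + d.1) (q.2 + d.2) (by omega) (by omega) hrl hcl hnew
      have := h.meas
      simp only [List.length_append, List.length_cons, List.length_nil]
      omega
  · -- neighbour already visited: state unchanged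
    refine ⟨h, ?_, fun p hp => hp⟩
    intro _
    simpa using hnew
  · -- out of bounds: state unchanged, and the coverage claim is vacuous
    refine ⟨h, ?_, fun p hp => hp⟩
    intro hin
    exact absurd (by obtain ⟨a, b, c, e⟩ := hin; omega : (0 ≤ q.1 + d.1 ∧ q.1 + d.1 ≤ (grid.length : Int) - 1 ∧ 0 ≤ q.2 + d.2 ∧ q.2 + d.2 ≤ ((grid.headD []).length : Int) - 1)) hbnd

-- the main loop lemma
lemma bfsA_spec (grid : List (List Int)) (val : Int) :
    ∀ (fuel : Nat) (Q : List (Int × Int)) (vis : List (List Bool)) (score : Int)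
      (C : List (Int × Int)), InvA grid val Q vis C → score = (C.length : Int) →
      Q.length + cntF vis ≤ fuel →
      ∃ Cf : List (Int × Int),
        bfsA grid val ((grid.length : Int) - 1) (((grid.headD []).length : Int) - 1) fuel Q vis score = (Cf.length : Int) ∧
        Cf.Nodup ∧ ∀ p, p ∈ Cf ↔ Rch grid val p := by
  intro fuel
  induction fuel with
  | zero =>
    intro Q vis score C inv hsc hfu
    cases Q with
    | nil => exact ⟨C, by rw [bfsA]; exact hsc, inv.cnd, finalA grid val vis C inv⟩
    | cons x Q' => simp [List.length_cons] at hfu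
  | succ f ih =>
    intro Q vis score C inv hsc hfu
    cases Q with
    | nil => exact ⟨C, by rw [bfsA]; exact hsc, inv.cnd, finalA grid val vis C inv⟩
    | cons x Q' =>
      obtain ⟨r, c⟩ := x
      rw [bfsA]
      split_ifs with hge
      · -- the popped cell is at or above the threshold: it is skipped
        refine ih Q' vis score C ⟨inv.dims, ?_, inv.qnd.of_cons, inv.orig, inv.reach, inv.cnd, ?_, ?_, inv.cclosed⟩ hsc ?_
        · exact fun x hx => inv.qmem x (List.mem_cons_of_mem _ hx)
        · intro x hx
          obtain ⟨hm, hq2, hok⟩ := inv.cmem x hx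
          exact ⟨hm, fun hc => hq2 (List.mem_cons_of_mem _ hc), hok⟩
        · intro p hm hq2 hok
          by_cases hpe : p = (r, c)
          · subst hpe
            exact absurd (show gval grid r c < val from hok.2) (by omega)
          · exact inv.cfull p hm (by rw [List.mem_cons]; tauto) hok
        · simp only [List.length_cons] at hfu
          omega
      · -- the popped cell is counted and its neighbours are pushed
        have hq0 : mget vis r c = true := inv.qmem (r, c) List.mem_cons_self
        have hin : inBg grid (r, c) := mget_inB grid vis inv.dims r c hq0
        have hok : okg grid val (r, c) := ⟨hin, show gval grid r c < val by omega⟩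
        have hrch : Rch grid val (r, c) := rch_of_mget_ok grid val vis inv.reach (r, c) hq0 hok
        have hrq : (r, c) ∉ Q' := (List.nodup_cons.mp inv.qnd).1
        have hrC : (r, c) ∉ C := by
          intro hC
          exact (inv.cmem _ hC).2.1 List.mem_cons_self
        have mid0 : Mid grid val (r, c) C (Q'.length + cntF vis) (Q', vis) := by
          refine ⟨inv.dims, fun x hx => inv.qmem x (List.mem_cons_of_mem _ hx), inv.qnd.of_cons,
            inv.orig, inv.reach, ?_, ?_, inv.cclosed, rfl⟩
          · intro x hx
            rcases List.mem_cons.mp hx with rfl | hx'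
            · exact ⟨hq0, hrq, hok⟩
            · obtain ⟨hm, hq2, hok'⟩ := inv.cmem x hx'
              exact ⟨hm, fun hc => hq2 (List.mem_cons_of_mem _ hc), hok'⟩
          · intro p hm hq2 hok'
            by_cases hpe : p = (r, c)
            · exact hpe ▸ List.mem_cons_self
            · exact List.mem_cons_of_mem _ (inv.cfull p hm (by rw [List.mem_cons]; tauto) hok')
        -- unroll the four directions
        have hm1 : (0, 1) ∈ pvDirections := by simp [pvDirections]
        have hm2 : (1, 0) ∈ pvDirections := by simp [pvDirections]
        have hm3 : ((0 : Int), (-1 : Int)) ∈ pvDirections := by simp [pvDirections]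
        have hm4 : ((-1 : Int), (0 : Int)) ∈ pvDirections := by simp [pvDirections]
        have h1 := tryPush_mid grid val (r, c) C _ (0, 1) hm1 hrch (Q', vis) mid0
        have h2 := tryPush_mid grid val (r, c) C _ (1, 0) hm2 hrch _ h1.1
        have h3 := tryPush_mid grid val (r, c) C _ (0, -1) hm3 hrch _ h2.1
        have h4 := tryPush_mid grid val (r, c) C _ (-1, 0) hm4 hrch _ h3.1
        set mr := (grid.length : Int) - 1
        set mc := ((grid.headD []).length : Int) - 1
        set s1 := tryPush mr mc r c (Q', vis) (0, 1) with hs1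
        set s2 := tryPush mr mc r c s1 (1, 0) with hs2
        set s3 := tryPush mr mc r c s2 (0, -1) with hs3
        set s4 := tryPush mr mc r c s3 (-1, 0) with hs4
        have hfold : pvDirections.foldl (tryPush mr mc r c) (Q', vis) = s4 := by
          simp only [pvDirections, List.foldl_cons, List.foldl_nil, hs1, hs2, hs3, hs4]
        have hcov : ∀ p : Int × Int, inBg grid p → adjc (r, c) p → mget s4.2 p.1 p.2 = true := by
          intro p hpin hadj
          rw [adjc_iff] at hadj
          rcases hadj with rfl | rfl | rfl | rfl
          · have c1 := h1.2.1
            simp only [Prod.fst, Prod.snd] at c1 hpin ⊢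
            have t1 := c1 (by simpa using hpin)
            have t2 := h2.2.2 ((r, c).1 + (0, 1).1, (r, c).2 + (0, 1).2) t1
            have t3 := h3.2.2 ((r, c).1 + (0, 1).1, (r, c).2 + (0, 1).2) t2
            have t4 := h4.2.2 ((r, c).1 + (0, 1).1, (r, c).2 + (0, 1).2) t3
            simpa using t4
          · have t1 := h2.2.1 (by simpa using hpin)
            have t2 := h3.2.2 ((r, c).1 + (1, 0).1, (r, c).2 + (1, 0).2) t1
            have t3 := h4.2.2 ((r, c).1 + (1, 0).1, (r, c).2 + (1, 0).2) t2
            simpa using t3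
          · have t1 := h3.2.1 (by simpa using hpin)
            have t2 := h4.2.2 ((r, c).1 + (0, -1).1, (r, c).2 + (0, -1).2) t1
            simpa using t2
          · have t1 := h4.2.1 (by simpa using hpin)
            simpa using t1
        have hm4' := h4.1
        refine ih s4.1 s4.2 (score + 1) ((r, c) :: C)
          ⟨hm4'.dims, hm4'.qmem, hm4'.qnd, hm4'.orig, hm4'.reach, List.nodup_cons.mpr ⟨hrC, inv.cnd⟩,
            hm4'.cmem, hm4'.cfull, ?_⟩ ?_ ?_ |>.imp ?_
        · intro x hx p hpin hadj
          rcases List.mem_cons.mp hx with rfl | hx'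
          · exact hcov p hpin hadj
          · exact hm4'.cclC x hx' p hpin hadj
        · simp only [List.length_cons]
          push_cast
          omega
        · have := hm4'.meas
          simp only [List.length_cons] at hfu
          omega
        · intro Cf hCf
          rw [hfold]
          exact hCf

-- ---------- initial state and characterization of port A ----------

lemma rch_empty (grid : List (List Int)) (val : Int) (h : ¬ okg grid val origin) :
    ∀ p, ¬ Rch grid val p := by
  rintro p ⟨hrtg, hok⟩
  rcases Relation.ReflTransGen.cases_head hrtg with rfl | ⟨x, hstep, _⟩
  · exact h hok
  · exact h hstep.1

lemma count_false_all_false {α : Type} (l : List α) :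
    (l.map (fun _ => false)).count false = l.length := by
  induction l with
  | nil => rfl
  | cons a t ih => simp [List.count_cons, ih]

lemma sum_map_const_nat {α : Type} (l : List α) (k : Nat) :
    (l.map (fun _ => k)).sum = l.length * k := by
  induction l with
  | nil => simp
  | cons a t ih => simp [ih]; ring

lemma helper_char (grid : List (List Int)) (val : Int) (hg : grid ≠ [])
    (hr : grid.headD [] ≠ []) :
    ∃ Cf : List (Int × Int), helper grid val = (Cf.length : Int) ∧ Cf.Nodup ∧
      ∀ p, p ∈ Cf ↔ Rch grid val p := by
  obtain ⟨g0, gs, rfl⟩ : ∃ g0 gs, grid = g0 :: gs := by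
    cases grid with
    | nil => exact absurd rfl hg
    | cons g0 gs => exact ⟨g0, gs, rfl⟩
  have hr0 : (g0 :: gs).headD [] = g0 := rfl
  rw [helper]
  split_ifs with hv
  · -- grid[0][0] > val: immediate 0, and nothing is reachable
    refine ⟨[], by simp, by simp, fun p => ?_⟩
    simp only [List.not_mem_nil, false_iff]
    exact rch_empty _ val (by rintro ⟨_, hlt⟩; exact absurd (show gval (g0 :: gs) 0 0 < val from hlt) (by omega)) p
  · -- BFS from (0,0)
    set vis0 := (g0 :: gs).map (fun _ => ((g0 :: gs).headD []).map (fun _ => false)) with hvis0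
    have hdims0 : dimsOk (g0 :: gs) vis0 := by
      constructor
      · simp [hvis0]
      · intro row hrow
        simp only [hvis0, List.mem_map] at hrow
        obtain ⟨_, _, rfl⟩ := hrow
        simp
    have hmget0 : ∀ r c : Int, mget vis0 r c = false := by
      intro r c
      rw [mget_eq]
      split_ifs with hgc
      · simp only [hvis0, List.getElem?_map]
        cases hx : (g0 :: gs)[r.toNat]? with
        | none => simp
        | some row =>
          simp only [Option.map_some, Option.getD_some, List.getElem?_map]
          cases hy : ((g0 :: gs).headD [])[c.toNat]? with
          | none => simp
          | some v => simp
      · rfl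
    have hn0 : 0 < g0.length := by
      cases g0 with
      | nil => exact absurd hr0 (by simpa using hr)
      | cons a t => simp
    have hrow0 : vis0[(0 : Nat)]?.getD [] = g0.map (fun _ => false) := by
      simp [hvis0]
    have hb1 : (0 : Int).toNat < vis0.length := by simp [hvis0]
    have hb2 : (0 : Int).toNat < (vis0[(0 : Int).toNat]?.getD []).length := by
      rw [show (0 : Int).toNat = (0 : Nat) from rfl, hrow0]
      simpa using hn0
    have horg : mget (mset vis0 0 0) 0 0 = true := mget_mset_self vis0 0 0 le_rfl le_rfl hb1 hb2
    have hcnt0 : cntF vis0 = (g0 :: gs).length * g0.length := by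
      unfold cntF
      rw [hvis0]
      rw [List.map_map]
      have : ((fun row => List.count false row) ∘ fun _ => ((g0 :: gs).headD []).map fun _ => false)
          = fun (_ : List Int) => g0.length := by
        funext x
        simp only [Function.comp]
        rw [hr0]
        exact count_false_all_false g0
      rw [this, sum_map_const_nat]
    have hcnt1 : cntF (mset vis0 0 0) + 1 = cntF vis0 :=
      cntF_mset vis0 0 0 le_rfl le_rfl hb1 hb2 (hmget0 0 0)
    have hinv : InvA (g0 :: gs) val [origin] (mset vis0 0 0) [] := by
      refine ⟨mset_dims _ _ hdims0 _ _, ?_, by simp, horg, ?_, by simp, by simp, ?_, by simp⟩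
      · intro x hx
        simp only [List.mem_singleton] at hx
        subst hx
        exact horg
      · intro p hp
        rcases mget_mset_cases _ _ _ _ _ hp with ⟨e1, e2⟩ | hold
        · left
          exact Prod.ext (by simpa using e1) (by simpa using e2)
        · rw [hmget0] at hold
          simp at hold
      · intro p hp hq _
        rcases mget_mset_cases _ _ _ _ _ hp with ⟨e1, e2⟩ | hold
        · exact absurd (by simp [origin, Prod.ext_iff, e1, e2] : p ∈ [origin]) hq
        · rw [hmget0] at hold
          simp at hold
    have := bfsA_spec (g0 :: gs) val ((g0 :: gs).length * ((g0 :: gs).headD []).length + 1)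
      [origin] (mset vis0 0 0) 0 [] hinv (by simp)
      (by rw [hr0]; simp only [List.length_singleton]; omega)
    simpa [origin] using this

-- ---------- characterization of port B ----------

lemma nbr_iff (marked : List (Int × Int)) (p : Int × Int) :
    ((p.1 - 1, p.2) ∈ marked ∨ (p.1 + 1, p.2) ∈ marked ∨ (p.1, p.2 - 1) ∈ marked ∨
      (p.1, p.2 + 1) ∈ marked) ↔ ∃ b ∈ marked, adjc b p := by
  constructor
  · rintro (h | h | h | h)
    · exact ⟨_, h, by rw [adjc_iff]; right; left; exact Prod.ext_iff.mpr ⟨show p.1 = p.1 - 1 + 1 by omega, rfl⟩⟩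
    · exact ⟨_, h, by rw [adjc_iff]; right; right; right; exact Prod.ext_iff.mpr ⟨show p.1 = p.1 + 1 - 1 by omega, rfl⟩⟩
    · exact ⟨_, h, by rw [adjc_iff]; left; exact Prod.ext_iff.mpr ⟨rfl, show p.2 = p.2 - 1 + 1 by omega⟩⟩
    · exact ⟨_, h, by rw [adjc_iff]; right; right; left; exact Prod.ext_iff.mpr ⟨rfl, show p.2 = p.2 + 1 - 1 by omega⟩⟩
  · rintro ⟨⟨b1, b2⟩, hb, hadj⟩
    rw [adjc_iff] at hadj
    rcases hadj with he | he | he | he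
    · subst he; right; right; left; simpa using hb
    · subst he; left; simpa using hb
    · subst he; right; right; right; simpa using hb
    · subst he; right; left; simpa using hb

-- the action of B's sweep on one cell
def cellStep (grid : List (List Int)) (val : Int) (s : List (Int × Int) × Bool)
    (x : Int × Int) : List (Int × Int) × Bool :=
  if x ∉ s.1 ∧ gval grid x.1 x.2 < val then
    if (x.1 - 1, x.2) ∈ s.1 ∨ (x.1 + 1, x.2) ∈ s.1 ∨ (x.1, x.2 - 1) ∈ s.1 ∨ (x.1, x.2 + 1) ∈ s.1
    then (PySem.Set.add s.1 x, true)
    else s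
  else s

-- the row-major list of board positions
def cells (m n : Int) : List (Int × Int) :=
  (PySem.List.pyRange 0 m 1).flatMap (fun r => (PySem.List.pyRange 0 n 1).map (fun c => (r, c)))

lemma mem_cells (m n : Int) (p : Int × Int) :
    p ∈ cells m n ↔ 0 ≤ p.1 ∧ p.1 < m ∧ 0 ≤ p.2 ∧ p.2 < n := by
  unfold cells
  simp only [List.mem_flatMap, List.mem_map, PySem.List.mem_pyRange_one]
  constructor
  · rintro ⟨r, hr, c, hc, rfl⟩
    exact ⟨hr.1, hr.2, hc.1, hc.2⟩
  · rintro ⟨h1, h2, h3, h4⟩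
    exact ⟨p.1, ⟨h1, h2⟩, p.2, ⟨h3, h4⟩, rfl⟩

lemma foldl_flatMap {α β γ : Type} (l : List α) (g : α → List β) (f : γ → β → γ) (init : γ) :
    (l.flatMap g).foldl f init = l.foldl (fun acc x => (g x).foldl f acc) init := by
  induction l generalizing init with
  | nil => rfl
  | cons a t ih => rw [List.flatMap_cons, List.foldl_append, List.foldl_cons, ih]

lemma passB_eq_foldl (grid : List (List Int)) (val m n : Int) (s0 : List (Int × Int) × Bool) :
    passB grid val m n s0 = (cells m n).foldl (cellStep grid val) s0 := by
  unfold passB cells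
  rw [foldl_flatMap]
  congr 1
  funext s r
  rw [List.foldl_map]
  rfl

-- adding a fresh element to a set is an append
lemma set_add_fresh {α : Type} [BEq α] [LawfulBEq α] (s : List α) (x : α) (hx : x ∉ s) :
    PySem.Set.add s x = s ++ [x] := by
  unfold PySem.Set.add
  rw [if_neg (by simpa using hx)]

-- the sweep invariant: the state extends marked, stays a nodup list of reachable cells,
-- the flag records exactly whether the state moved
structure SInv (grid : List (List Int)) (val : Int) (marked : List (Int × Int))
    (s : List (Int × Int) × Bool) : Prop where
  pre : ∃ extra, s.1 = marked ++ extra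
  nd : s.1.Nodup
  rch : ∀ p ∈ s.1, Rch grid val p
  flagF : s.2 = false → s.1 = marked
  flagT : s.2 = true → marked.length < s.1.length

lemma cellStep_SInv (grid : List (List Int)) (val : Int) (marked : List (Int × Int))
    (s : List (Int × Int) × Bool) (x : Int × Int) (hx : x ∈ cells (grid.length : Int) ((grid.headD []).length : Int))
    (h : SInv grid val marked s) : SInv grid val marked (cellStep grid val s x) := by
  unfold cellStep
  split_ifs with h1 h2
  · obtain ⟨hnm, hlt⟩ := h1
    rw [set_add_fresh s.1 x hnm]
    obtain ⟨b, hb, hadj⟩ := (nbr_iff s.1 x).mp h2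
    have hok : okc grid val (grid.length : Int) ((grid.headD []).length : Int) x :=
      ⟨(mem_cells _ _ x).mp hx, hlt⟩
    have hrx : Rch grid val x := by
      have hrb := h.rch b hb
      exact ⟨hrb.1.tail ⟨hrb.2, hok, hadj⟩, hok⟩
    obtain ⟨extra, hext⟩ := h.pre
    refine ⟨⟨extra ++ [x], by rw [hext, List.append_assoc]⟩, ?_, ?_, by simp, ?_⟩
    · refine List.Nodup.append h.nd (by simp) ?_
      intro a ha hb'
      simp only [List.mem_singleton] at hb'
      subst hb'
      exact hnm ha
    · intro p hp
      rcases List.mem_append.mp hp with hp' | hp'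
      · exact h.rch p hp'
      · simp only [List.mem_singleton] at hp'
        subst hp'
        exact hrx
    · intro _
      obtain ⟨extra', hext'⟩ := h.pre
      rw [hext', List.length_append, List.length_append]
      simp
  · exact h
  · exact h

lemma cellStep_flag_mono (grid : List (List Int)) (val : Int) (s : List (Int × Int) × Bool)
    (x : Int × Int) (h : s.2 = true) : (cellStep grid val s x).2 = true := by
  unfold cellStep
  split_ifs <;> simp [h]

lemma foldl_flag_mono (grid : List (List Int)) (val : Int) (L : List (Int × Int)) :
    ∀ s : List (Int × Int) × Bool, s.2 = true →
      (L.foldl (cellStep grid val) s).2 = true := by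
  induction L with
  | nil => exact fun s h => h
  | cons a t ih => exact fun s h => ih _ (cellStep_flag_mono grid val s a h)

lemma foldl_SInv (grid : List (List Int)) (val : Int) (marked : List (Int × Int))
    (L : List (Int × Int)) (hL : ∀ x ∈ L, x ∈ cells (grid.length : Int) ((grid.headD []).length : Int)) :
    ∀ s : List (Int × Int) × Bool, SInv grid val marked s →
      SInv grid val marked (L.foldl (cellStep grid val) s) := by
  induction L with
  | nil => exact fun s h => h
  | cons a t ih =>
    intro s h
    exact ih (fun x hx => hL x (List.mem_cons_of_mem _ hx)) _
      (cellStep_SInv grid val marked s a (hL a List.mem_cons_self) h)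

-- if a sweep ends with the flag still false, it moved nothing and every cell's test failed
lemma foldl_nochange (grid : List (List Int)) (val : Int) (L : List (Int × Int)) :
    ∀ s : List (Int × Int) × Bool, (L.foldl (cellStep grid val) s).2 = false →
      L.foldl (cellStep grid val) s = s ∧
        ∀ x ∈ L, ¬(x ∉ s.1 ∧ gval grid x.1 x.2 < val ∧
          ((x.1 - 1, x.2) ∈ s.1 ∨ (x.1 + 1, x.2) ∈ s.1 ∨ (x.1, x.2 - 1) ∈ s.1 ∨ (x.1, x.2 + 1) ∈ s.1)) := by
  induction L with
  | nil => exact fun s _ => ⟨rfl, by simp⟩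
  | cons a t ih =>
    intro s hf
    rw [List.foldl_cons] at hf
    have hflag : (cellStep grid val s a).2 = false := by
      by_contra hb
      rw [foldl_flag_mono grid val t _ (by revert hb; cases (cellStep grid val s a).2 <;> simp)] at hf
      exact absurd hf (by simp)
    have hstep : cellStep grid val s a = s ∧
        ¬(a ∉ s.1 ∧ gval grid a.1 a.2 < val ∧
          ((a.1 - 1, a.2) ∈ s.1 ∨ (a.1 + 1, a.2) ∈ s.1 ∨ (a.1, a.2 - 1) ∈ s.1 ∨ (a.1, a.2 + 1) ∈ s.1)) := by
      by_cases h1 : a ∉ s.1 ∧ gval grid a.1 a.2 < val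
      · by_cases h2 : (a.1 - 1, a.2) ∈ s.1 ∨ (a.1 + 1, a.2) ∈ s.1 ∨ (a.1, a.2 - 1) ∈ s.1 ∨ (a.1, a.2 + 1) ∈ s.1
        · exfalso
          have ht : (cellStep grid val s a).2 = true := by
            unfold cellStep
            rw [if_pos h1, if_pos h2]
          exact absurd (ht.symm.trans hflag) (by simp)
        · refine ⟨?_, fun hc => h2 hc.2.2⟩
          unfold cellStep
          rw [if_pos h1, if_neg h2]
      · refine ⟨?_, fun hc => h1 ⟨hc.1, hc.2.1⟩⟩
        unfold cellStep
        rw [if_neg h1]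
    rw [hstep.1] at hf
    obtain ⟨heq, hall⟩ := ih s hf
    refine ⟨by rw [List.foldl_cons, hstep.1, heq], ?_⟩
    intro x hx
    rcases List.mem_cons.mp hx with rfl | hx'
    · exact hstep.2
    · exact hall x hx'

lemma length_le_area (grid : List (List Int)) (L : List (Int × Int)) (hnd : L.Nodup)
    (hin : ∀ p ∈ L, inBg grid p) :
    L.length ≤ grid.length * (grid.headD []).length := by
  classical
  have hsub : L.toFinset ⊆
      (Finset.Ico (0 : Int) (grid.length : Int)) ×ˢ
        (Finset.Ico (0 : Int) ((grid.headD []).length : Int)) := by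
    intro p hp
    obtain ⟨h1, h2, h3, h4⟩ := hin p (List.mem_toFinset.mp hp)
    rw [Finset.mem_product, Finset.mem_Ico, Finset.mem_Ico]
    exact ⟨⟨h1, h2⟩, h3, h4⟩
  have hcard := Finset.card_le_card hsub
  rw [List.toFinset_card_of_nodup hnd, Finset.card_product, Int.card_Ico, Int.card_Ico] at hcard
  simpa using hcard

lemma loopB_spec (grid : List (List Int)) (val : Int) :
    ∀ (k : Nat) (marked : List (Int × Int)), marked.Nodup →
      (∀ p ∈ marked, Rch grid val p) → origin ∈ marked →
      grid.length * (grid.headD []).length + 1 ≤ marked.length + k →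
      ∃ Mf : List (Int × Int),
        loopB grid val (grid.length : Int) ((grid.headD []).length : Int) k marked = (Mf.length : Int) ∧
        Mf.Nodup ∧ ∀ p, p ∈ Mf ↔ Rch grid val p := by
  intro k
  induction k with
  | zero =>
    intro marked hnd hrch _ hmeas
    have hbound := length_le_area grid marked hnd (fun p hp => (hrch p hp).2.1)
    omega
  | succ k ih =>
    intro marked hnd hrch horg hmeas
    rw [loopB]
    have hs : passB grid val (grid.length : Int) ((grid.headD []).length : Int) (marked, false)
        = (cells (grid.length : Int) ((grid.headD []).length : Int)).foldl (cellStep grid val) (marked, false) :=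
      passB_eq_foldl _ _ _ _ _
    have hSInv : SInv grid val marked
        (passB grid val (grid.length : Int) ((grid.headD []).length : Int) (marked, false)) := by
      rw [hs]
      exact foldl_SInv grid val marked _ (fun x hx => hx) (marked, false)
        ⟨⟨[], by simp⟩, hnd, hrch, fun _ => rfl, by simp⟩
    split_ifs with hflag
    · -- the sweep changed something: the marked set strictly grew, recurse
      have hgrow := hSInv.flagT hflag
      refine ih _ hSInv.nd hSInv.rch ?_ (by omega)
      obtain ⟨extra, he⟩ := hSInv.pre
      rw [he]
      exact List.mem_append.mpr (Or.inl horg)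
    · -- the sweep changed nothing: marked is closed, hence exactly the reachable set
      have hf : (passB grid val (grid.length : Int) ((grid.headD []).length : Int) (marked, false)).2 = false := by
        revert hflag
        cases (passB grid val (grid.length : Int) ((grid.headD []).length : Int) (marked, false)).2 <;> simp
      obtain ⟨heq, hall⟩ := foldl_nochange grid val
        (cells (grid.length : Int) ((grid.headD []).length : Int)) (marked, false) (by rw [← hs]; exact hf)
      have hseq : (passB grid val (grid.length : Int) ((grid.headD []).length : Int) (marked, false)).1 = marked := by
        rw [hs, heq]
      rw [hseq]
      refine ⟨marked, rfl, hnd, fun p => ⟨fun hp => hrch p hp, ?_⟩⟩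
      rintro ⟨hrtg, hok⟩
      have key : ∀ x : Int × Int,
          Relation.ReflTransGen (stepR grid val (grid.length : Int) ((grid.headD []).length : Int)) origin x →
          okc grid val (grid.length : Int) ((grid.headD []).length : Int) x → x ∈ marked := by
        intro x hx
        induction hx with
        | refl => intro _; exact horg
        | tail hab hbc ihx =>
          rename_i b c'
          intro hokc
          obtain ⟨hokb, _, hadj⟩ := hbc
          have hbm := ihx hokb
          by_cases hcm : c' ∈ marked
          · exact hcm
          · exfalso
            refine hall c' ((mem_cells _ _ c').mpr hokc.1) ⟨hcm, hokc.2, ?_⟩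
            exact (nbr_iff marked c').mpr ⟨b, hbm, hadj⟩
      exact key p hrtg hok

lemma helperAlt_char (grid : List (List Int)) (val : Int) (hg : grid ≠ [])
    (hr : grid.headD [] ≠ []) :
    ∃ Mf : List (Int × Int), helper_alt grid val = (Mf.length : Int) ∧ Mf.Nodup ∧
      ∀ p, p ∈ Mf ↔ Rch grid val p := by
  rw [helper_alt]
  split_ifs with hv
  · refine ⟨[], by simp, by simp, fun p => ?_⟩
    simp only [List.not_mem_nil, false_iff]
    exact rch_empty grid val (by rintro ⟨_, hlt⟩; exact absurd (show gval grid 0 0 < val from hlt) (by omega)) p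
  · have hm0 : 0 < grid.length := List.length_pos_iff.mpr hg
    have hn0 : 0 < (grid.headD []).length := List.length_pos_iff.mpr hr
    have hok0 : okc grid val (grid.length : Int) ((grid.headD []).length : Int) origin := by
      refine ⟨⟨le_rfl, ?_, le_rfl, ?_⟩, show gval grid 0 0 < val by omega⟩
      · show (0 : Int) < (grid.length : Int)
        exact_mod_cast hm0
      · show (0 : Int) < ((grid.headD []).length : Int)
        exact_mod_cast hn0
    have := loopB_spec grid val (grid.length * (grid.headD []).length) [origin]
      (by simp) (fun p hp => by simp at hp; subst hp; exact ⟨Relation.ReflTransGen.refl, hok0⟩)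
      (by simp) (by simp only [List.length_singleton]; omega)
    simpa [origin] using this

-- the two nodup enumerations of the same set have equal length
lemma length_eq_of_same_mem (L M : List (Int × Int)) (hL : L.Nodup) (hM : M.Nodup)
    (h : ∀ p, p ∈ L ↔ p ∈ M) : L.length = M.length :=
  ((List.perm_ext_iff_of_nodup hL hM).mpr h).length_eq

-- ===== VERDICT (by name: the statement is the Claim_ definition above) =====
theorem helper_spec : Claim_equal_helper := by
  intro grid val _ hpre
  obtain ⟨hg, hr, _⟩ := hpre
  unfold Spec_helper
  obtain ⟨Cf, hA, ndA, memA⟩ := helper_char grid val hg hr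
  obtain ⟨Mf, hB, ndB, memB⟩ := helperAlt_char grid val hg hr
  rw [hA, hB, length_eq_of_same_mem Cf Mf ndA ndB (fun p => (memA p).trans (memB p).symm)]
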